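-- pv_equiv track=rewrite | github.com/martikecskemeti/battleship | bs/battleship-FINAL.py | rep_num
-- ===== SOURCE A (Python) =====
-- def rep_num(m):
--     row_names = ["A","B","C","D","E","F","G","H","I","J"]
--     n = 0
--     for i in row_names:
--         n += 1
--         if m ==  i:
--             m = str(n)
--             return m
-- ===== SOURCE B (Python) =====
-- def rep_num(m):
--     if isinstance(m, str) and len(m) == 1 and "A" <= m <= "J":
--         return str(ord(m) - 64)
--     return None
-- ===== Notes on version B (the rewrite author's own statement) =====
-- stated objective: idiomatic
-- what changed: Replaced the counting loop over the ten-letter list with a closed-form ordinal computation str(ord(m)-64) behind a single range guard, returning None otherwise.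
import Mathlib
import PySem

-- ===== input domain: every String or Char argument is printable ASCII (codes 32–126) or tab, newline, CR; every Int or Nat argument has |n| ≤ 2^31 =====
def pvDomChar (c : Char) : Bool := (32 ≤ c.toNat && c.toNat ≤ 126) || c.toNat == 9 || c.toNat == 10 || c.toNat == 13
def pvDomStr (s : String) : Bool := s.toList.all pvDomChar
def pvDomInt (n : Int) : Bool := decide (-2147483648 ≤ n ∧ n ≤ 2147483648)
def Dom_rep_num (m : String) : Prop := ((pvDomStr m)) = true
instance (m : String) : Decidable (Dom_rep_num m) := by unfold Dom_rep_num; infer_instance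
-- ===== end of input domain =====

-- B replaces A's counting loop over the ten-letter list by a closed-form ordinal
-- computation (str(ord(m) - 64)) behind a single length/range guard; return value only.

-- ===== PORT A =====
-- the for-loop over row_names with the counter n
def rep_num_loop (names : List String) (n : Int) (m : String) : Option String :=
  match names with
  | [] => none
  | i :: rest =>
      if m == i then some (PySem.Int.toStr (n + 1)) else rep_num_loop rest (n + 1) m

def rep_num (m : String) : Option String :=
  rep_num_loop ["A","B","C","D","E","F","G","H","I","J"] 0 m

-- ===== PORT B =====
-- len(m) == 1 and "A" <= m <= "J" (lexicographic comparison of length-1 strings is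
-- the comparison of their single characters), then str(ord(m) - 64)
def rep_num_alt (m : String) : Option String :=
  match m.toList with
  | [c] => if 'A' ≤ c ∧ c ≤ 'J' then some (PySem.Int.toStr ((c.toNat : Int) - 64)) else none
  | _ => none

-- ===== PRECONDITION & SPEC =====
def Spec_rep_num (m : String) (out : Option String) : Prop := out = rep_num_alt m
instance (m : String) (out : Option String) : Decidable (Spec_rep_num m out) := by unfold Spec_rep_num; infer_instance

-- ===== CLAIM (what is proved, stated in full; the proofs are below) =====
def Claim_equal_rep_num : Prop := ∀ (m : String), Dom_rep_num m → Spec_rep_num m (rep_num m)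

-- ===== LEMMAS AND PROOFS =====

-- a character in the range 'A'..'J' is one of those ten letters
theorem char_range_cases (c : Char) (h1 : 'A' ≤ c) (h2 : c ≤ 'J') :
    c = 'A' ∨ c = 'B' ∨ c = 'C' ∨ c = 'D' ∨ c = 'E' ∨ c = 'F' ∨ c = 'G' ∨ c = 'H' ∨
    c = 'I' ∨ c = 'J' := by
  have hv : 65 ≤ c.val.toNat ∧ c.val.toNat ≤ 74 := by
    simp only [Char.le_def, UInt32.le_iff_toNat_le] at h1 h2
    exact ⟨h1, h2⟩
  have : c.val.toNat = 65 ∨ c.val.toNat = 66 ∨ c.val.toNat = 67 ∨ c.val.toNat = 68 ∨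
      c.val.toNat = 69 ∨ c.val.toNat = 70 ∨ c.val.toNat = 71 ∨ c.val.toNat = 72 ∨
      c.val.toNat = 73 ∨ c.val.toNat = 74 := by omega
  rcases this with h | h | h | h | h | h | h | h | h | h
  · left; apply Char.ext; apply UInt32.toNat_inj.mp; simpa using h
  · right; left; apply Char.ext; apply UInt32.toNat_inj.mp; simpa using h
  · right; right; left; apply Char.ext; apply UInt32.toNat_inj.mp; simpa using h
  · right; right; right; left; apply Char.ext; apply UInt32.toNat_inj.mp; simpa using h
  · right; right; right; right; left; apply Char.ext; apply UInt32.toNat_inj.mp; simpa using h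
  · right; right; right; right; right; left; apply Char.ext; apply UInt32.toNat_inj.mp; simpa using h
  · right; right; right; right; right; right; left; apply Char.ext; apply UInt32.toNat_inj.mp; simpa using h
  · right; right; right; right; right; right; right; left; apply Char.ext; apply UInt32.toNat_inj.mp; simpa using h
  · right; right; right; right; right; right; right; right; left; apply Char.ext; apply UInt32.toNat_inj.mp; simpa using h
  · right; right; right; right; right; right; right; right; right; apply Char.ext; apply UInt32.toNat_inj.mp; simpa using h

theorem eq_of_toList_eq (m : String) (l : List Char) (h : m.toList = l) : m = String.ofList l := by
  rw [← h, String.ofList_toList]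

-- ===== VERDICT (by name: the statement is the Claim_ definition above) =====
theorem rep_num_spec : Claim_equal_rep_num := by
  intro m _
  unfold Spec_rep_num
  by_cases hA : m = "A"; · subst hA; decide
  by_cases hB : m = "B"; · subst hB; decide
  by_cases hC : m = "C"; · subst hC; decide
  by_cases hD : m = "D"; · subst hD; decide
  by_cases hE : m = "E"; · subst hE; decide
  by_cases hF : m = "F"; · subst hF; decide
  by_cases hG : m = "G"; · subst hG; decide
  by_cases hH : m = "H"; · subst hH; decide
  by_cases hI : m = "I"; · subst hI; decide
  by_cases hJ : m = "J"; · subst hJ; decide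
  -- m is none of the ten letters: both sides are none
  have hA' : rep_num m = none := by
    simp [rep_num, rep_num_loop, hA, hB, hC, hD, hE, hF, hG, hH, hI, hJ]
  rw [hA']
  match hl : m.toList with
  | [c] =>
      simp only [rep_num_alt, hl]
      split_ifs with hr
      · exfalso
        have hm := eq_of_toList_eq m [c] hl
        rcases char_range_cases c hr.1 hr.2 with h | h | h | h | h | h | h | h | h | h <;> subst h
        · exact hA (hm.trans (by decide))
        · exact hB (hm.trans (by decide))
        · exact hC (hm.trans (by decide))
        · exact hD (hm.trans (by decide))
        · exact hE (hm.trans (by decide))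
        · exact hF (hm.trans (by decide))
        · exact hG (hm.trans (by decide))
        · exact hH (hm.trans (by decide))
        · exact hI (hm.trans (by decide))
        · exact hJ (hm.trans (by decide))
      · rfl
  | [] => simp [rep_num_alt, hl]
  | c1 :: c2 :: rest => simp [rep_num_alt, hl]
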